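-- pv_equiv track=rewrite | github.com/magartrantit/Python-Cazan-Rares-2024 | Tema2/pb9.py | seats
-- ===== SOURCE A (Python) =====
-- def seats(matrix):
--     nrl = len(matrix)
--     nrc = len(matrix[0])
--     ret_list = []
--
--     for col in range(nrc):
--         for row in range(1, nrl):
--             for prev_row in range(row):
--                 if matrix[row][col] <= matrix[prev_row][col]:
--                     ret_list.append((row, col))
--                     break
--
--     return ret_list
-- ===== SOURCE B (Python) =====
-- def seats(matrix):
--     ret = []
--     for col in range(len(matrix[0])):
--         running = matrix[0][col]
--         for row in range(1, len(matrix)):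
--             v = matrix[row][col]
--             if v <= running:
--                 ret.append((row, col))
--             else:
--                 running = v
--     return ret
-- ===== Notes on version B (the rewrite author's own statement) =====
-- stated objective: faster
-- what changed: B keeps a running column maximum and compares each cell to it, removing A's inner scan over all earlier rows.
import Mathlib
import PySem

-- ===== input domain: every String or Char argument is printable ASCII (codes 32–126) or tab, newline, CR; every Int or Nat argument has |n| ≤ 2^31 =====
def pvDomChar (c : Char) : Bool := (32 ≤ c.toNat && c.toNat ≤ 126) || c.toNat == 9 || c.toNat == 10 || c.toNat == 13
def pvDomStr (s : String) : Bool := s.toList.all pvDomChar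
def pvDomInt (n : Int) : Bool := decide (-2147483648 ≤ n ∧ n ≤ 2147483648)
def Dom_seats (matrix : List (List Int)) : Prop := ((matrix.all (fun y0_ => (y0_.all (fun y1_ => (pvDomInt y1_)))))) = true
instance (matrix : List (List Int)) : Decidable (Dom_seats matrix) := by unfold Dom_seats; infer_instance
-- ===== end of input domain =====

-- B replaces A's inner scan over all earlier rows by a running column maximum (O(C·R) vs O(C·R²)).

-- ===== PORT A =====
-- matrix[row][col], total under Pre_ (indices in range there); used by both ports
def pvGetAt (matrix : List (List Int)) (r c : Int) : Int :=
  PySem.List.pyGetD (PySem.List.pyGetD matrix r []) c 0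

def seats (matrix : List (List Int)) : List (Int × Int) :=
  let nrl : Int := matrix.length
  let nrc : Int := (PySem.List.pyGetD matrix 0 []).length
  (PySem.List.pyRange 0 nrc 1).foldl (fun acc col =>
    (PySem.List.pyRange 1 nrl 1).foldl (fun acc2 row =>
      -- inner 'for prev_row … break': append once iff some earlier row qualifies
      if (PySem.List.pyRange 0 row 1).any (fun p => decide (pvGetAt matrix row col ≤ pvGetAt matrix p col))
      then acc2 ++ [(row, col)] else acc2) acc) []

-- ===== PORT B =====
def seats_alt (matrix : List (List Int)) : List (Int × Int) :=
  (PySem.List.pyRange 0 ((PySem.List.pyGetD matrix 0 []).length : Int) 1).foldl (fun acc col =>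
    ((PySem.List.pyRange 1 (matrix.length : Int) 1).foldl
      (fun (st : List (Int × Int) × Int) row =>
        let v := pvGetAt matrix row col
        if v ≤ st.2 then (st.1 ++ [(row, col)], st.2) else (st.1, v))
      (acc, pvGetAt matrix 0 col)).1) []

-- ===== PRECONDITION & SPEC =====
-- Pre_ excludes exactly the inputs where Python A raises an IndexError: the empty matrix
-- (matrix[0]) and matrices with a row shorter than the first row (matrix[row][col]).
def Pre_seats (matrix : List (List Int)) : Prop :=
  matrix ≠ [] ∧ ∀ r ∈ matrix, (matrix.headD []).length ≤ r.length
instance (matrix : List (List Int)) : Decidable (Pre_seats matrix) := by unfold Pre_seats; infer_instance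

def pvWitness_seats : List (List Int) := [[1, 2], [2, 1]]

def Spec_seats (matrix : List (List Int)) (out : List (Int × Int)) : Prop := out = seats_alt matrix
instance (matrix : List (List Int)) (out : List (Int × Int)) : Decidable (Spec_seats matrix out) := by unfold Spec_seats; infer_instance

-- ===== CLAIM (what is proved, stated in full; the proofs are below) =====
def Claim_equal_seats : Prop := ∀ (matrix : List (List Int)), Dom_seats matrix → Pre_seats matrix → Spec_seats matrix (seats matrix)

-- ===== LEMMAS AND PROOFS =====

-- Per-column loop equivalence: if rm is the running maximum of g over rows 0..a-1
-- (stated as: 'v ≤ some earlier value' ⟺ 'v ≤ rm'), A's inner-scan fold over rows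
-- a..a+n-1 equals B's running-maximum fold.
lemma pv_inner_eq (g : Int → Int) (col : Int) :
    ∀ (n : Nat) (a : Int) (acc : List (Int × Int)) (rm : Int), 0 ≤ a →
    (∀ v : Int, (PySem.List.pyRange 0 a 1).any (fun p => decide (v ≤ g p)) = decide (v ≤ rm)) →
    (PySem.List.pyRange a (a + n) 1).foldl (fun acc2 row =>
        if (PySem.List.pyRange 0 row 1).any (fun p => decide (g row ≤ g p))
        then acc2 ++ [(row, col)] else acc2) acc
    = ((PySem.List.pyRange a (a + n) 1).foldl
        (fun (st : List (Int × Int) × Int) row =>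
          let v := g row
          if v ≤ st.2 then (st.1 ++ [(row, col)], st.2) else (st.1, v)) (acc, rm)).1 := by
  intro n
  induction n with
  | zero =>
      intro a acc rm _ _
      rw [PySem.List.pyRange_one_eq_nil (by omega)]
      simp
  | succ n ih =>
      intro a acc rm ha hmax
      rw [PySem.List.pyRange_one_cons (by omega : a < a + (n + 1 : Nat))]
      simp only [List.foldl_cons, hmax (g a)]
      have hsplit : ∀ v : Int,
          (PySem.List.pyRange 0 (a + 1) 1).any (fun p => decide (v ≤ g p))
            = ((PySem.List.pyRange 0 a 1).any (fun p => decide (v ≤ g p)) || decide (v ≤ g a)) := by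
        intro v
        rw [PySem.List.pyRange_one_succ_right (by omega)]
        simp
      by_cases h : g a ≤ rm
      · simp only [decide_eq_true h, if_pos h]
        have : a + (n + 1 : Nat) = (a + 1) + n := by push_cast; ring
        rw [this]
        apply ih (a + 1) _ rm (by omega)
        intro v
        rw [hsplit v, hmax v]
        by_cases hv : v ≤ rm <;> simp [hv] <;> omega
      · simp only [decide_eq_false h, if_neg h]
        have : a + (n + 1 : Nat) = (a + 1) + n := by push_cast; ring
        rw [this]
        apply ih (a + 1) _ (g a) (by omega)
        intro v
        rw [hsplit v, hmax v]
        by_cases hv : v ≤ g a <;> simp [hv] <;> omega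
      
lemma pv_col_eq (matrix : List (List Int)) (acc : List (Int × Int)) (col : Int) :
    (PySem.List.pyRange 1 (matrix.length : Int) 1).foldl (fun acc2 row =>
        if (PySem.List.pyRange 0 row 1).any
            (fun p => decide (pvGetAt matrix row col ≤ pvGetAt matrix p col))
        then acc2 ++ [(row, col)] else acc2) acc
    = ((PySem.List.pyRange 1 (matrix.length : Int) 1).foldl
        (fun (st : List (Int × Int) × Int) row =>
          let v := pvGetAt matrix row col
          if v ≤ st.2 then (st.1 ++ [(row, col)], st.2) else (st.1, v))
        (acc, pvGetAt matrix 0 col)).1 := by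
  rcases Nat.eq_zero_or_pos matrix.length with h | h
  · rw [PySem.List.pyRange_one_eq_nil (by omega)]
    simp
  · have hlen : (matrix.length : Int) = 1 + ((matrix.length - 1 : Nat) : Int) := by
      omega
    rw [hlen]
    apply pv_inner_eq (fun r => pvGetAt matrix r col) col (matrix.length - 1) 1 acc
      (pvGetAt matrix 0 col) (by omega)
    intro v
    have : PySem.List.pyRange 0 1 1 = [(0 : Int)] := PySem.List.pyRange_one_singleton 0
    rw [this]
    simp

-- ===== VERDICT (by name: the statement is the Claim_ definition above) =====
theorem seats_spec : Claim_equal_seats := by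
  intro matrix _ _
  unfold Spec_seats seats seats_alt
  simp only []
  congr 1
  funext acc col
  exact pv_col_eq matrix acc col
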